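-- pv_equiv track=rewrite | github.com/pypi-data/pypi-mirror-73 | packages/beginnerpy/BeginnerPy-2020.2.4.tar.gz/BeginnerPy-2020.2.4/beginnerpy/challenges/daily/c8.py | find_cadence
-- ===== SOURCE A (Python) =====
-- class StateMachine:
--     def __init__(self):
--         self.value = None
--         self.start = State("<start>")
--         self.current_state = self.start
--
--     def transition(self, state):
--         self.value = self.current_state.transition(state)
--         self.current_state = state
--
-- class State:
--     def __init__(self, name, default_rule=None):
--         self.name = name
--         self.transitions = {}
--         self.default_rule = default_rule
--
--     def add_rule(self, edge, *states):
--         for state in states: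
--             self.transitions[state] = edge
--
--     def transition(self, state):
--         return self.transitions.get(state, self.default_rule)
--
-- def find_cadence(chords: list) -> str:
--     states = {
--         "I": State("I", "no cadence"),
--         "IV": State("IV", "no cadence"),
--         "V": State("V", "interrupted"),
--         "any": State("any", "no cadence")
--     }
--
--     machine = StateMachine()
--
--     machine.start.default_rule = "no cadence"
--     states["any"].add_rule("imperfect", states["V"])
--     states["V"].add_rule("perfect", states["I"])
--     states["IV"].add_rule("plagal", states["I"])
--     states["I"].add_rule("imperfect", states["V"])
--     states["IV"].add_rule("imperfect", states["V"])
--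
--     for chord in chords:
--         machine.transition(states.get(chord.upper(), states["any"]))
--
--     return machine.value
-- ===== SOURCE B (Python) =====
-- def _norm(chord):
--     c = chord.upper()
--     return c if c in ("I", "IV", "V") else "any"
--
-- def _cadence(prev, last):
--     if prev == "V":
--         return "perfect" if last == "I" else "interrupted"
--     if prev == "IV" and last == "I":
--         return "plagal"
--     if prev in ("I", "IV", "any") and last == "V":
--         return "imperfect"
--     return "no cadence"
--
-- def find_cadence(chords: list) -> str:
--     rev = chords[::-1]
--     if not rev:
--         return None
--     last = _norm(rev[0])
--     prev = _norm(rev[1]) if len(rev) > 1 else "<start>"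
--     return _cadence(prev, last)
-- ===== Notes on version B (the rewrite author's own statement) =====
-- stated objective: faster
-- what changed: B drops the whole state machine: only the last two chords (normalized via upper()) determine the cadence, so B inspects them directly with an O(1) lookup instead of A's per-chord dict-driven transitions.
import Mathlib
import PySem

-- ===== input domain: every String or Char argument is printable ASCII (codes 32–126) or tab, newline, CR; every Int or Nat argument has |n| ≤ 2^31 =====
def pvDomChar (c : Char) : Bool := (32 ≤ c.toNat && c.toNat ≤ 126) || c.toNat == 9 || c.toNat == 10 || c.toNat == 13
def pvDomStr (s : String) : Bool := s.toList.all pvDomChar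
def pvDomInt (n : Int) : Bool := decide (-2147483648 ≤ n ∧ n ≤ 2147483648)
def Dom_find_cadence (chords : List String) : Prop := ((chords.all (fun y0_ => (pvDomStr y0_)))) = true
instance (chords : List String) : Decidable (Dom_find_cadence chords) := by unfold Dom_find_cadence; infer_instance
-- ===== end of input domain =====

-- B drops A's state machine: only the last two chords determine the cadence, so B decides from them directly.

-- ===== PORT A =====
-- A's State: name, transitions (dict keyed by the target state's name -- the four State objects are
-- distinct and uniquely named, so keying by name is exact for Python's identity-keyed dict), default_rule.
structure PState where
  name : String
  transitions : PySem.Dict String String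
  default_rule : Option String
deriving Repr, DecidableEq

-- State.transition: self.transitions.get(state, self.default_rule)
def pstateTransition (s : PState) (t : PState) : Option String :=
  match PySem.Dict.get? s.transitions t.name with
  | some e => some e
  | none => s.default_rule

-- the five states as they stand after all add_rule calls / the default_rule assignment in find_cadence
def stStart : PState := ⟨"<start>", PySem.Dict.mk [], some "no cadence"⟩
def stI : PState := ⟨"I", PySem.Dict.mk [("V", "imperfect")], some "no cadence"⟩
def stIV : PState := ⟨"IV", PySem.Dict.mk [("I", "plagal"), ("V", "imperfect")], some "no cadence"⟩
def stV : PState := ⟨"V", PySem.Dict.mk [("I", "perfect")], some "interrupted"⟩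
def stAny : PState := ⟨"any", PySem.Dict.mk [("V", "imperfect")], some "no cadence"⟩

-- the states dict of find_cadence (distinct literal keys)
def statesDict : PySem.Dict String PState :=
  PySem.Dict.mk [("I", stI), ("IV", stIV), ("V", stV), ("any", stAny)]

-- states.get(chord.upper(), states["any"])
def lookupState (chord : String) : PState :=
  (PySem.Dict.get? statesDict (PySem.Str.upper chord)).getD stAny

-- machine.transition(state): value := current.transition(state); current := state
def machineStep (m : Option String × PState) (st : PState) : Option String × PState :=
  (pstateTransition m.2 st, st)

def find_cadence (chords : List String) : Option String :=
  (chords.foldl (fun m chord => machineStep m (lookupState chord)) (none, stStart)).1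

-- ===== PORT B =====
-- _norm
def normChord (chord : String) : String :=
  let c := PySem.Str.upper chord
  if c = "I" ∨ c = "IV" ∨ c = "V" then c else "any"

-- _cadence
def cadenceOf (prev last : String) : String :=
  if prev = "V" then (if last = "I" then "perfect" else "interrupted")
  else if prev = "IV" ∧ last = "I" then "plagal"
  else if (prev = "I" ∨ prev = "IV" ∨ prev = "any") ∧ last = "V" then "imperfect"
  else "no cadence"

def find_cadence_alt (chords : List String) : Option String :=
  match chords.reverse with   -- chords[::-1] (exact: full-list reverse slice)
  | [] => none
  | [c] => some (cadenceOf "<start>" (normChord c))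
  | c :: c' :: _ => some (cadenceOf (normChord c') (normChord c))

-- ===== PRECONDITION & SPEC =====
def Spec_find_cadence (chords : List String) (out : Option String) : Prop := out = find_cadence_alt chords
instance (chords : List String) (out : Option String) : Decidable (Spec_find_cadence chords out) := by unfold Spec_find_cadence; infer_instance

-- ===== CLAIM (what is proved, stated in full; the proofs are below) =====
def Claim_equal_find_cadence : Prop := ∀ (chords : List String), Dom_find_cadence chords → Spec_find_cadence chords (find_cadence chords)

-- ===== LEMMAS AND PROOFS =====

-- proof-side value of the machine run: prev tag, remaining chords
def gRun (p : String) : List String → String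
  | [] => ""
  | [c] => cadenceOf p (normChord c)
  | c :: c' :: r => gRun (normChord c) (c' :: r)

lemma normChord_mem (c : String) :
    normChord c = "I" ∨ normChord c = "IV" ∨ normChord c = "V" ∨ normChord c = "any" := by
  unfold normChord
  by_cases h : PySem.Str.upper c = "I" ∨ PySem.Str.upper c = "IV" ∨ PySem.Str.upper c = "V"
  · simp [h]; tauto
  · simp [h]

-- which state object the normalized tag names
def pickState (t : String) : PState :=
  if t = "I" then stI else if t = "IV" then stIV else if t = "V" then stV else stAny

lemma lookupState_eq (c : String) : lookupState c = pickState (normChord c) := by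
  unfold lookupState normChord pickState statesDict
  by_cases h1 : PySem.Str.upper c = "I"
  · simp [h1, PySem.Dict.get?_mk_cons]
  · by_cases h2 : PySem.Str.upper c = "IV"
    · simp [h2, PySem.Dict.get?_mk_cons]
    · by_cases h3 : PySem.Str.upper c = "V"
      · simp [h3, PySem.Dict.get?_mk_cons]
      · simp [h1, h2, h3, PySem.Dict.get?, Ne.symm h1, Ne.symm h2, Ne.symm h3]
        split <;> rfl

lemma pickState_name (t : String)
    (ht : t = "I" ∨ t = "IV" ∨ t = "V" ∨ t = "any") : (pickState t).name = t := by
  rcases ht with rfl | rfl | rfl | rfl <;> rfl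

-- one transition computes exactly B's cadence table entry
lemma transition_eq_cadence (s : PState)
    (hs : s = stStart ∨ s = stI ∨ s = stIV ∨ s = stV ∨ s = stAny) (c : String) :
    pstateTransition s (lookupState c) = some (cadenceOf s.name (normChord c)) := by
  rw [lookupState_eq]
  rcases normChord_mem c with hc | hc | hc | hc <;> rw [hc] <;>
    rcases hs with rfl | rfl | rfl | rfl | rfl <;>
      simp [pstateTransition, pickState, stStart, stI, stIV, stV, stAny, cadenceOf, PySem.Dict.get?]

lemma foldA (l : List String) : ∀ (c : String) (s : PState)
    (hs : s = stStart ∨ s = stI ∨ s = stIV ∨ s = stV ∨ s = stAny) (v : Option String),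
    (List.foldl (fun m chord => machineStep m (lookupState chord)) (v, s) (c :: l)).1
      = some (gRun s.name (c :: l)) := by
  induction l with
  | nil =>
    intro c s hs v
    simpa [machineStep, gRun] using transition_eq_cadence s hs c
  | cons c' r ih =>
    intro c s hs v
    have hmem : lookupState c = stI ∨ lookupState c = stIV ∨ lookupState c = stV ∨
        lookupState c = stAny := by
      rw [lookupState_eq]
      rcases normChord_mem c with hc | hc | hc | hc <;> rw [hc] <;> simp [pickState]
    have hname : (lookupState c).name = normChord c := by
      rw [lookupState_eq, pickState_name _ (normChord_mem c)]
    have hs' : lookupState c = stStart ∨ lookupState c = stI ∨ lookupState c = stIV ∨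
        lookupState c = stV ∨ lookupState c = stAny := by
      rcases hmem with h | h | h | h
      · exact Or.inr (Or.inl h)
      · exact Or.inr (Or.inr (Or.inl h))
      · exact Or.inr (Or.inr (Or.inr (Or.inl h)))
      · exact Or.inr (Or.inr (Or.inr (Or.inr h)))
    have hih := ih c' (lookupState c) hs' (pstateTransition s (lookupState c))
    rw [hname] at hih
    have hstep : List.foldl (fun m chord => machineStep m (lookupState chord)) (v, s) (c :: c' :: r)
        = List.foldl (fun m chord => machineStep m (lookupState chord))
            (pstateTransition s (lookupState c), lookupState c) (c' :: r) := by
      rw [List.foldl_cons]; rfl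
    have hg : gRun s.name (c :: c' :: r) = gRun (normChord c) (c' :: r) := rfl
    rw [hstep, hg]
    exact hih

-- B via gRun: the reverse-match formula equals the forward recursion
lemma gRun_rev (l : List String) : ∀ (c : String) (p : String),
    gRun p (c :: l) = match (c :: l).reverse with
      | [] => ""
      | [c1] => cadenceOf p (normChord c1)
      | c1 :: c2 :: _ => cadenceOf (normChord c2) (normChord c1) := by
  induction l with
  | nil => intro c p; simp [gRun]
  | cons c' r ih =>
    intro c p
    have h1 : gRun p (c :: c' :: r) = gRun (normChord c) (c' :: r) := rfl
    rw [h1, ih c' (normChord c)]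
    rcases hrev : (c' :: r).reverse with _ | ⟨c1, _ | ⟨c2, rest⟩⟩
    · exact absurd hrev (by simp)
    · have : (c :: c' :: r).reverse = [c1, c] := by
        rw [List.reverse_cons, hrev]; rfl
      simp [this]
    · have : (c :: c' :: r).reverse = c1 :: c2 :: (rest ++ [c]) := by
        rw [List.reverse_cons, hrev]; rfl
      simp [this]

-- ===== VERDICT (by name: the statement is the Claim_ definition above) =====
theorem find_cadence_spec : Claim_equal_find_cadence := by
  intro chords _
  unfold Spec_find_cadence find_cadence find_cadence_alt
  cases chords with
  | nil => rfl
  | cons c l =>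
    rw [foldA l c stStart (by tauto) none]
    have hn : stStart.name = "<start>" := rfl
    rw [hn, gRun_rev l c "<start>"]
    rcases hrev : (c :: l).reverse with _ | ⟨c1, _ | ⟨c2, rest⟩⟩
    · exact absurd hrev (by simp)
    · simp
    · simp
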